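-- pv_equiv track=rewrite | github.com/abrunier3/S24-ArchitectingLunarBases | S24/sysml/parser.py | _normalize_multiline_attributes
-- ===== SOURCE A (Python) =====
-- def _normalize_multiline_attributes(text: str) -> str:
--     lines = text.splitlines()
--     new_lines = []
--     buffer = ""
--
--     for line in lines:
--         stripped = line.strip()
--
--         if buffer:
--             buffer += " " + stripped
--             if ";" in stripped:
--                 new_lines.append(buffer)
--                 buffer = ""
--         else:
--             if stripped.startswith("attribute") and not stripped.endswith(";"):
--                 buffer = stripped
--             else:
--                 new_lines.append(line)
--
--     if buffer:
--         new_lines.append(buffer)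
--
--     return "\n".join(new_lines)
-- ===== SOURCE B (Python) =====
-- def _normalize_multiline_attributes(text: str) -> str:
--     lines = text.splitlines()
--     out = []
--     i = 0
--     n = len(lines)
--     while i < n:
--         stripped = lines[i].strip()
--         if stripped.startswith("attribute") and not stripped.endswith(";"):
--             buf = stripped
--             i += 1
--             while i < n:
--                 s = lines[i].strip()
--                 buf += " " + s
--                 i += 1
--                 if ";" in s:
--                     break
--             out.append(buf)
--         else:
--             out.append(lines[i])
--             i += 1
--     return "\n".join(out)
-- ===== Notes on version B (the rewrite author's own statement) =====
-- stated objective: alternative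
-- what changed: Replaces the carried buffer-flag state machine (one flat loop over lines with a persistent buffer and a final flush) by an index-driven outer loop with an explicit inner grouping loop that consumes a whole multiline attribute declaration at once.
import Mathlib
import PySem

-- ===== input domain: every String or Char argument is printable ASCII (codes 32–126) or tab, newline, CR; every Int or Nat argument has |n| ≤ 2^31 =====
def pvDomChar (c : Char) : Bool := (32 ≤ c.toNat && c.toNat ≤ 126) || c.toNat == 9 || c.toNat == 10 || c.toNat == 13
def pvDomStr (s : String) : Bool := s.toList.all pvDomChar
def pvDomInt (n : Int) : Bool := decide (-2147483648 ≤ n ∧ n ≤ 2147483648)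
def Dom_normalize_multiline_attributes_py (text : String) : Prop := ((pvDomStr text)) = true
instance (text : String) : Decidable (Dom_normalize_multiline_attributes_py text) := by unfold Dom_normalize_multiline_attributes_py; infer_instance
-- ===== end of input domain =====

-- B replaces A's carried buffer-flag state machine by an outer loop with an explicit inner
-- grouping loop that consumes a whole multiline attribute declaration at once (alternative
-- decomposition, same cost). Ports work on List Char via PySem.Chars (thin exact wrappers).

-- ===== PORT A =====
-- the body of A's for-loop: state = (new_lines, buffer)
def pvAStep (st : List (List Char) × List Char) (line : List Char) :
    List (List Char) × List Char :=
  let stripped := PySem.Chars.strip line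
  if st.2 ≠ [] then
    let buffer := st.2 ++ ' ' :: stripped
    if PySem.Chars.isIn [';'] stripped then (st.1 ++ [buffer], []) else (st.1, buffer)
  else
    if PySem.Chars.startswith stripped "attribute".toList &&
       !PySem.Chars.endswith stripped [';'] then
      (st.1, stripped)
    else
      (st.1 ++ [line], [])

def normalize_multiline_attributes_py (text : String) : String :=
  let lines := PySem.Chars.splitlines text.toList
  let st := lines.foldl pvAStep ([], [])
  let new_lines := if st.2 ≠ [] then st.1 ++ [st.2] else st.1
  String.ofList (PySem.Chars.join ['\n'] new_lines)

-- ===== PORT B =====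
-- inner grouping loop: append stripped continuation lines to buf until a consumed line has ';'
def pvCollect (buf : List Char) : List (List Char) → List Char × List (List Char)
  | [] => (buf, [])
  | l :: rest =>
    let s := PySem.Chars.strip l
    let buf' := buf ++ ' ' :: s
    if PySem.Chars.isIn [';'] s then (buf', rest) else pvCollect buf' rest

theorem pvCollect_length_le (buf : List Char) (xs : List (List Char)) :
    (pvCollect buf xs).2.length ≤ xs.length := by
  induction xs generalizing buf with
  | nil => simp [pvCollect]
  | cons l rest ih =>
    simp only [pvCollect]
    split
    · simp
    · exact Nat.le_trans (ih _) (Nat.le_succ _)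

-- outer loop over the remaining lines
def pvBLoop : List (List Char) → List (List Char)
  | [] => []
  | l :: rest =>
    let s := PySem.Chars.strip l
    if PySem.Chars.startswith s "attribute".toList && !PySem.Chars.endswith s [';'] then
      let p := pvCollect s rest
      p.1 :: pvBLoop p.2
    else
      l :: pvBLoop rest
termination_by xs => xs.length
decreasing_by
  · exact Nat.lt_succ_of_le (pvCollect_length_le _ _)
  · simp

def normalize_multiline_attributes_py_alt (text : String) : String :=
  String.ofList (PySem.Chars.join ['\n'] (pvBLoop (PySem.Chars.splitlines text.toList)))

-- ===== PRECONDITION & SPEC =====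
def Spec_normalize_multiline_attributes_py (text : String) (out : String) : Prop := out = normalize_multiline_attributes_py_alt text
instance (text : String) (out : String) : Decidable (Spec_normalize_multiline_attributes_py text out) := by unfold Spec_normalize_multiline_attributes_py; infer_instance

-- ===== CLAIM (what is proved, stated in full; the proofs are below) =====
def Claim_equal_normalize_multiline_attributes_py : Prop := ∀ (text : String), Dom_normalize_multiline_attributes_py text → Spec_normalize_multiline_attributes_py text (normalize_multiline_attributes_py text)

-- ===== LEMMAS AND PROOFS =====

-- A's end-of-loop flush
def pvFinish (st : List (List Char) × List Char) : List (List Char) :=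
  if st.2 ≠ [] then st.1 ++ [st.2] else st.1

theorem pv_stripped_ne_nil {s : List Char}
    (h : PySem.Chars.startswith s "attribute".toList = true) : s ≠ [] := by
  have := (PySem.Chars.startswith_iff _ _).1 h
  rcases this with ⟨t, ht⟩
  intro hs
  rw [hs] at ht
  exact absurd ht.symm (by simp)

theorem pv_key : ∀ (n : Nat) (xs : List (List Char)), xs.length ≤ n →
    (∀ acc, pvFinish (xs.foldl pvAStep (acc, [])) = acc ++ pvBLoop xs) ∧
    (∀ acc b, b ≠ [] →
      pvFinish (xs.foldl pvAStep (acc, b)) =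
        acc ++ (pvCollect b xs).1 :: pvBLoop (pvCollect b xs).2) := by
  intro n
  induction n with
  | zero =>
    intro xs hx
    have : xs = [] := List.eq_nil_of_length_eq_zero (Nat.le_zero.1 hx)
    subst this
    constructor
    · intro acc; simp [pvFinish, pvBLoop]
    · intro acc b hb; simp [pvFinish, pvBLoop, pvCollect, hb]
  | succ n ih =>
    intro xs hx
    cases xs with
    | nil =>
      constructor
      · intro acc; simp [pvFinish, pvBLoop]
      · intro acc b hb; simp [pvFinish, pvBLoop, pvCollect, hb]
    | cons l rest =>
      have hrest : rest.length ≤ n := Nat.lt_succ_iff.1 (Nat.lt_of_lt_of_le (by simp) hx)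
      constructor
      · intro acc
        rw [List.foldl_cons]
        show pvFinish (rest.foldl pvAStep (pvAStep (acc, []) l)) = _
        simp only [pvAStep]
        rw [if_neg (by simp : ¬(([] : List Char) ≠ []))]
        rw [pvBLoop]
        by_cases hc : (PySem.Chars.startswith (PySem.Chars.strip l) "attribute".toList &&
            !PySem.Chars.endswith (PySem.Chars.strip l) [';']) = true
        · rw [if_pos hc, if_pos hc]
          have hs : PySem.Chars.strip l ≠ [] :=
            pv_stripped_ne_nil (Bool.and_elim_left hc)
          exact (ih rest hrest).2 acc _ hs
        · rw [if_neg hc, if_neg hc]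
          rw [(ih rest hrest).1 (acc ++ [l])]
          simp
      · intro acc b hb
        rw [List.foldl_cons]
        show pvFinish (rest.foldl pvAStep (pvAStep (acc, b) l)) = _
        simp only [pvAStep, pvCollect]
        rw [if_pos hb]
        by_cases hc : PySem.Chars.isIn [';'] (PySem.Chars.strip l) = true
        · rw [if_pos hc, if_pos hc]
          rw [(ih rest hrest).1 (acc ++ [b ++ ' ' :: PySem.Chars.strip l])]
          simp
        · rw [if_neg hc, if_neg hc]
          have hb' : b ++ ' ' :: PySem.Chars.strip l ≠ [] := by simp
          exact (ih rest hrest).2 acc _ hb'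

-- ===== VERDICT (by name: the statement is the Claim_ definition above) =====
theorem normalize_multiline_attributes_py_spec : Claim_equal_normalize_multiline_attributes_py := by
  intro text _
  unfold Spec_normalize_multiline_attributes_py
  unfold normalize_multiline_attributes_py normalize_multiline_attributes_py_alt
  have h := (pv_key (PySem.Chars.splitlines text.toList).length
      (PySem.Chars.splitlines text.toList) (Nat.le_refl _)).1 []
  simp only [pvFinish] at h
  simp only []
  rw [h]
  simp
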